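-- pv_equiv track=rewrite | github.com/KingCatZero/AlgoExpert | Hard/numbersInPi.py | numbersInPi
-- ===== SOURCE A (Python) =====
-- def numbersInPi(pi, numbers):
--     minCuts = [-1] * len(pi)
--     numberLookup = set(numbers)
--
--     for i in range(len(pi) - 1, -1, -1):
--         if pi[i :] in numberLookup:
--             minCuts[i] = 0
--         else:
--             minCutsForSubstring = float('inf')
--
--             for j in range(i + 1, len(pi)):
--                 if (pi[i : j] in numberLookup) and (minCuts[j] >= 0):
--                     minCutsForSubstring = min(minCutsForSubstring, minCuts[j] + 1)
--
--             if minCutsForSubstring < float('inf'):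
--                 minCuts[i] = minCutsForSubstring
--
--     return minCuts[0]
-- ===== SOURCE B (Python) =====
-- def numbersInPi(pi, numbers):
--     # Backward DP over "number of pieces" with a word-driven inner loop:
--     # instead of scanning every split point j and hashing the slice pi[i:j],
--     # try each candidate number with startswith (no slicing, no set).
--     n = len(pi)
--     # dp[i] = minimal number of pieces covering pi[i:]; 0 means "impossible"
--     # for i < n, and dp[n] = 0 stands for the empty suffix (0 pieces).
--     dp = [0] * (n + 1)
--     for i in range(n - 1, -1, -1):
--         best = 0
--         for num in numbers:
--             k = i + len(num)
--             if k <= n and pi.startswith(num, i) and (k == n or dp[k] > 0):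
--                 cand = dp[k] + 1
--                 if best == 0 or cand < best:
--                     best = cand
--         dp[i] = best
--     return dp[0] - 1
-- ===== Notes on version B (the rewrite author's own statement) =====
-- stated objective: faster
-- what changed: A's backward DP scans every split point j and slices/hashes pi[i:j] against a set (O(n) work per candidate); B keeps a backward DP over 'number of pieces' but drives the inner loop by the candidate numbers themselves, testing each with startswith at position i, so no slice is built and no set is needed.
import Mathlib
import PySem

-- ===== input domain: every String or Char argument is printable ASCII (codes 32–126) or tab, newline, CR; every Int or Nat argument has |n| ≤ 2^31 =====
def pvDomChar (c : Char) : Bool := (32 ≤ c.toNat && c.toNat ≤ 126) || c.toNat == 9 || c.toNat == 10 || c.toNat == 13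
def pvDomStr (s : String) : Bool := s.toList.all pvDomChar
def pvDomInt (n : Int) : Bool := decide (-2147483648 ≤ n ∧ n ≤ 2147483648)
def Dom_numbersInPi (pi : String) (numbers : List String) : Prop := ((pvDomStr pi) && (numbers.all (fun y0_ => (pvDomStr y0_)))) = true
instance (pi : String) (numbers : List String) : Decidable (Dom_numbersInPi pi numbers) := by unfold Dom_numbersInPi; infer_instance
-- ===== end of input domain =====

-- B replaces A's position-driven inner scan (slice pi[i:j] + set lookup for every split j) by a
-- word-driven inner loop over the candidate numbers using startswith; return values agree on
-- every non-empty pi (Python A raises IndexError on pi = "", excluded by Pre_).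

-- ===== PORT A =====
-- the Python set of strings is modelled on the char-list side (String equality ↔ toList equality)
def numbersInPi (pi : String) (numbers : List String) : Int :=
  let cs := pi.toList
  let n : Int := PySem.List.len cs
  let minCuts0 : List Int := List.replicate cs.length (-1)
  let numberLookup : PySem.Set (List Char) := PySem.Set.ofList (numbers.map String.toList)
  let minCuts := (PySem.List.pyRange (n - 1) (-1) (-1)).foldl (fun mc i =>
    if PySem.Set.contains numberLookup (PySem.List.slice cs (some i) none) then
      PySem.List.pySetD mc i 0
    else
      -- minCutsForSubstring, float('inf') modelled as `none`
      let m : Option Int := (PySem.List.pyRange (i + 1) n 1).foldl (fun m j =>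
        if PySem.Set.contains numberLookup (PySem.List.slice cs (some i) (some j)) &&
           decide (0 ≤ PySem.List.pyGetD mc j 0) then
          some (match m with
                | none => PySem.List.pyGetD mc j 0 + 1
                | some c => min c (PySem.List.pyGetD mc j 0 + 1))
        else m) none
      match m with
      | some v => PySem.List.pySetD mc i v
      | none => mc) minCuts0
  PySem.List.pyGetD minCuts 0 (-1)   -- minCuts[0]; IndexError on pi = "" is excluded by Pre_

-- ===== PORT B =====
def numbersInPi_alt (pi : String) (numbers : List String) : Int :=
  let cs := pi.toList
  let n : Int := PySem.List.len cs
  let dp0 : List Int := List.replicate (cs.length + 1) 0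
  let dp := (PySem.List.pyRange (n - 1) (-1) (-1)).foldl (fun dp i =>
    let best := numbers.foldl (fun best num =>
      let k : Int := i + PySem.List.len num.toList
      -- pi.startswith(num, i): exact here since 0 ≤ i ≤ len(pi)
      if decide (k ≤ n) && PySem.Chars.startswith (cs.drop i.toNat) num.toList &&
         (decide (k = n) || decide (0 < PySem.List.pyGetD dp k 0)) then
        let cand := PySem.List.pyGetD dp k 0 + 1
        if best == 0 || decide (cand < best) then cand else best
      else best) 0
    PySem.List.pySetD dp i best) dp0
  PySem.List.pyGetD dp 0 0 - 1

-- ===== PRECONDITION & SPEC =====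
-- Pre_ excludes only pi = "", on which Python A raises IndexError (minCuts is empty).
def Pre_numbersInPi (pi : String) (numbers : List String) : Prop := pi ≠ ""
instance (pi : String) (numbers : List String) : Decidable (Pre_numbersInPi pi numbers) := by unfold Pre_numbersInPi; infer_instance
def pvWitness_numbersInPi : String × List String := ("3141", ["1", "3", "4"])

def Spec_numbersInPi (pi : String) (numbers : List String) (out : Int) : Prop := out = numbersInPi_alt pi numbers
instance (pi : String) (numbers : List String) (out : Int) : Decidable (Spec_numbersInPi pi numbers out) := by unfold Spec_numbersInPi; infer_instance

-- ===== CLAIM (what is proved, stated in full; the proofs are below) =====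
def Claim_equal_numbersInPi : Prop := ∀ (pi : String) (numbers : List String), Dom_numbersInPi pi numbers → Pre_numbersInPi pi numbers → Spec_numbersInPi pi numbers (numbersInPi pi numbers)

-- ===== LEMMAS AND PROOFS =====

-- proof-side names for the ports' outer-loop bodies (definitionally equal to them)
def pvStepA (cs : List Char) (numbers : List String) (mc : List Int) (i : Int) : List Int :=
  if PySem.Set.contains (PySem.Set.ofList (numbers.map String.toList)) (PySem.List.slice cs (some i) none) then
    PySem.List.pySetD mc i 0
  else
    let m : Option Int := (PySem.List.pyRange (i + 1) (PySem.List.len cs) 1).foldl (fun m j =>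
      if PySem.Set.contains (PySem.Set.ofList (numbers.map String.toList)) (PySem.List.slice cs (some i) (some j)) &&
         decide (0 ≤ PySem.List.pyGetD mc j 0) then
        some (match m with
              | none => PySem.List.pyGetD mc j 0 + 1
              | some c => min c (PySem.List.pyGetD mc j 0 + 1))
      else m) none
    match m with
    | some v => PySem.List.pySetD mc i v
    | none => mc

def pvStepB (cs : List Char) (numbers : List String) (dp : List Int) (i : Int) : List Int :=
  let best := numbers.foldl (fun best num =>
    let k : Int := i + PySem.List.len num.toList
    if decide (k ≤ PySem.List.len cs) && PySem.Chars.startswith (cs.drop i.toNat) num.toList &&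
       (decide (k = PySem.List.len cs) || decide (0 < PySem.List.pyGetD dp k 0)) then
      let cand := PySem.List.pyGetD dp k 0 + 1
      if best == 0 || decide (cand < best) then cand else best
    else best) 0
  PySem.List.pySetD dp i best

theorem pv_numbersInPi_eq (pi : String) (numbers : List String) :
    numbersInPi pi numbers =
    PySem.List.pyGetD ((PySem.List.pyRange (PySem.List.len pi.toList - 1) (-1) (-1)).foldl
      (pvStepA pi.toList numbers) (List.replicate pi.toList.length (-1))) 0 (-1) := rfl

theorem pv_numbersInPi_alt_eq (pi : String) (numbers : List String) :
    numbersInPi_alt pi numbers =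
    PySem.List.pyGetD ((PySem.List.pyRange (PySem.List.len pi.toList - 1) (-1) (-1)).foldl
      (pvStepB pi.toList numbers) (List.replicate (pi.toList.length + 1) 0)) 0 0 - 1 := rfl

-- option-min ("inf"-style) and 0-sentinel min accumulators
def pvOptMin (m : Option Int) (v : Int) : Option Int :=
  match m with | none => some v | some c => some (min c v)

def pvSentMin (b v : Int) : Int := if b == 0 || decide (v < b) then v else b

def pvMin? (l : List Int) : Option Int := l.foldl pvOptMin none

theorem pvFoldOptMin_some (l : List Int) : ∀ c : Int, l.foldl pvOptMin (some c) = some (l.foldl min c) := by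
  induction l with
  | nil => intro c; rfl
  | cons a l ih => intro c; simpa [pvOptMin] using ih (min c a)

theorem pvMin?_cons (a : Int) (l : List Int) : pvMin? (a :: l) = some (l.foldl min a) := by
  simp [pvMin?, List.foldl_cons, pvOptMin, pvFoldOptMin_some]

theorem pvMin?_eq_none_iff (l : List Int) : pvMin? l = none ↔ l = [] := by
  cases l with
  | nil => simp [pvMin?]
  | cons a l => simp [pvMin?_cons]

theorem pvFoldMin_spec (l : List Int) : ∀ c : Int,
    (l.foldl min c = c ∨ l.foldl min c ∈ l) ∧ l.foldl min c ≤ c ∧ ∀ x ∈ l, l.foldl min c ≤ x := by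
  induction l with
  | nil => intro c; simp
  | cons a l ih =>
    intro c
    obtain ⟨h1, h2, h3⟩ := ih (min c a)
    rw [List.foldl_cons]
    refine ⟨?_, le_trans h2 (min_le_left _ _), ?_⟩
    · rcases h1 with h | h
      · rcases min_choice c a with hm | hm
        · exact Or.inl (h.trans hm)
        · exact Or.inr (by simp [h.trans hm])
      · exact Or.inr (List.mem_cons_of_mem _ h)
    · intro x hx
      rcases List.mem_cons.mp hx with rfl | hx
      · exact le_trans h2 (min_le_right _ _)
      · exact h3 x hx

theorem pvMin?_spec_some (l : List Int) (v : Int) (h : pvMin? l = some v) :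
    v ∈ l ∧ ∀ x ∈ l, v ≤ x := by
  cases l with
  | nil => simp [pvMin?] at h
  | cons a l =>
    rw [pvMin?_cons, Option.some.injEq] at h
    obtain ⟨h1, h2, h3⟩ := pvFoldMin_spec l a
    subst h
    refine ⟨?_, ?_⟩
    · rcases h1 with h | h
      · simp [h]
      · exact List.mem_cons_of_mem _ h
    · intro x hx
      rcases List.mem_cons.mp hx with rfl | hx
      · exact h2
      · exact h3 x hx

theorem pvMin?_congr (l₁ l₂ : List Int) (h : ∀ x, x ∈ l₁ ↔ x ∈ l₂) : pvMin? l₁ = pvMin? l₂ := by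
  cases h₁ : pvMin? l₁ with
  | none =>
    cases h₂ : pvMin? l₂ with
    | none => rfl
    | some v =>
      obtain ⟨hv, _⟩ := pvMin?_spec_some _ _ h₂
      have hnil := (pvMin?_eq_none_iff l₁).mp h₁
      subst hnil
      exact absurd ((h v).mpr hv) List.not_mem_nil
  | some v =>
    cases h₂ : pvMin? l₂ with
    | none =>
      obtain ⟨hv, _⟩ := pvMin?_spec_some _ _ h₁
      have hnil := (pvMin?_eq_none_iff l₂).mp h₂
      subst hnil
      exact absurd ((h v).mp hv) List.not_mem_nil
    | some w =>
      obtain ⟨hv, hvle⟩ := pvMin?_spec_some _ _ h₁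
      obtain ⟨hw, hwle⟩ := pvMin?_spec_some _ _ h₂
      have : v = w := le_antisymm (hvle w ((h w).mpr hw)) (hwle v ((h v).mp hv))
      simp [this]

theorem pvFoldOptMin_map_add (l : List Int) : ∀ m : Option Int,
    (l.map (· + 1)).foldl pvOptMin (m.map (· + 1)) = (l.foldl pvOptMin m).map (· + 1) := by
  induction l with
  | nil => intro m; rfl
  | cons a l ih =>
    intro m
    rw [List.map_cons, List.foldl_cons, List.foldl_cons]
    have hstep : pvOptMin (m.map (· + 1)) (a + 1) = (pvOptMin m a).map (· + 1) := by
      cases m with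
      | none => rfl
      | some c => simp [pvOptMin, min_add_add_right]
    rw [hstep, ih (pvOptMin m a)]

theorem pvMin?_map_add (l : List Int) : pvMin? (l.map (· + 1)) = (pvMin? l).map (· + 1) := by
  simpa [pvMin?] using pvFoldOptMin_map_add l none

theorem pvSentFold_pos (l : List Int) : ∀ c : Int, 0 < c → (∀ x ∈ l, 0 < x) →
    l.foldl pvSentMin c = (l.foldl pvOptMin (some c)).getD 0 := by
  induction l with
  | nil => intro c _ _; rfl
  | cons a l ih =>
    intro c hc hl
    have ha : 0 < a := hl a (by simp)
    have h1 : pvSentMin c a = min c a := by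
      simp only [pvSentMin]
      have hcne : (c == 0) = false := by simp; omega
      rw [hcne]
      simp only [Bool.false_or]
      by_cases hca : a < c
      · rw [if_pos (by simpa using hca), min_eq_right (le_of_lt hca)]
      · rw [if_neg (by simpa using hca), min_eq_left (by omega)]
    rw [List.foldl_cons, List.foldl_cons, h1]
    have h2 : pvOptMin (some c) a = some (min c a) := rfl
    rw [h2]
    exact ih (min c a) (lt_min hc ha) (fun x hx => hl x (List.mem_cons_of_mem _ hx))

theorem pvSentFold (l : List Int) (hl : ∀ x ∈ l, 0 < x) :
    l.foldl pvSentMin 0 = (pvMin? l).getD 0 := by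
  cases l with
  | nil => rfl
  | cons a l =>
    have ha : 0 < a := hl a (by simp)
    have h0 : pvSentMin 0 a = a := by simp [pvSentMin]
    rw [List.foldl_cons, h0]
    have hmin : pvMin? (a :: l) = l.foldl pvOptMin (some a) := by
      simp [pvMin?, List.foldl_cons, pvOptMin]
    rw [hmin, pvSentFold_pos l a ha (fun x hx => hl x (List.mem_cons_of_mem _ hx))]

theorem pvFoldCondOptMin {β : Type} (l : List β) (p : β → Bool) (f : β → Int) :
    l.foldl (fun m j => if p j then
        some (match m with | none => f j | some c => min c (f j))
      else m) none
    = pvMin? ((l.filter p).map f) := by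
  have hbody : (fun (m : Option Int) j => if p j then
        some (match m with | none => f j | some c => min c (f j))
      else m) = fun m j => if p j then pvOptMin m (f j) else m := by
    funext m j
    cases m <;> rfl
  rw [hbody, PySem.List.foldl_if_eq_foldl_filter p (fun m j => pvOptMin m (f j))]
  rw [pvMin?, List.foldl_map]

theorem pvFoldCondSent {β : Type} (l : List β) (q : β → Bool) (g : β → Int) :
    l.foldl (fun b x => if q x then
        (if b == 0 || decide (g x + 1 < b) then g x + 1 else b)
      else b) 0
    = ((l.filter q).map (fun x => g x + 1)).foldl pvSentMin 0 := by
  have hbody : (fun (b : Int) x => if q x then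
        (if b == 0 || decide (g x + 1 < b) then g x + 1 else b)
      else b) = fun b x => if q x then pvSentMin b (g x + 1) else b := rfl
  rw [hbody, PySem.List.foldl_if_eq_foldl_filter q (fun b x => pvSentMin b (g x + 1))]
  rw [List.foldl_map]

-- getD helpers
theorem pvGetD_eq (l : List Int) (i : Nat) (d : Int) (h : i < l.length) : l.getD i d = l[i] := by
  simp [List.getD_eq_getElem?_getD, List.getElem?_eq_getElem h]

theorem pvGetD_set (l : List Int) (i j : Nat) (v : Int) (hi : i < l.length) :
    (l.set i v).getD j 0 = if i = j then v else l.getD j 0 := by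
  rw [List.getD_eq_getElem?_getD, List.getElem?_set]
  split
  · simp
  · rw [List.getD_eq_getElem?_getD]

theorem pvSet_self (l : List Int) (i : Nat) (v : Int) (h : l.getD i 0 = v) (h2 : i < l.length) :
    l.set i v = l := by
  have hv : l[i] = v := by rw [← h, pvGetD_eq l i 0 h2]
  apply List.ext_getElem?
  intro j
  rw [List.getElem?_set]
  by_cases hij : i = j
  · subst hij
    rw [if_pos rfl, if_pos h2, List.getElem?_eq_getElem h2, hv]
  · rw [if_neg hij]

theorem pvReplicate_getD (n i : Nat) (a d : Int) :
    (List.replicate n a).getD i d = if i < n then a else d := by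
  split
  · exact List.getD_replicate a (by assumption)
  · rw [List.getD_eq_getElem?_getD, List.getElem?_eq_none (by simpa using by omega)]
    rfl

-- the word list, the candidate condition at position i, and the canonical candidate values
def pvL (numbers : List String) : List (List Char) := numbers.map String.toList

def pvOK (cs : List Char) (numbers : List String) (dp : List Int) (i k : Nat) : Prop :=
  i < k ∧ k ≤ cs.length ∧ (cs.drop i).take (k - i) ∈ pvL numbers ∧ (k = cs.length ∨ 0 < dp.getD k 0)

def pvKV (cs : List Char) (numbers : List String) (dp : List Int) (i : Nat) : List Int :=
  ((List.range (cs.length + 1)).filter (fun k => decide (i < k) && decide (k ≤ cs.length) &&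
      decide ((cs.drop i).take (k - i) ∈ pvL numbers) &&
      (decide (k = cs.length) || decide (0 < dp.getD k 0)))).map
    (fun k => dp.getD k 0)

theorem pvMem_KV (cs : List Char) (numbers : List String) (dp : List Int) (i : Nat) (x : Int) :
    x ∈ pvKV cs numbers dp i ↔ ∃ k : Nat, pvOK cs numbers dp i k ∧ x = dp.getD k 0 := by
  simp only [pvKV, List.mem_map, List.mem_filter, List.mem_range, Bool.and_eq_true,
    Bool.or_eq_true, decide_eq_true_eq, pvOK]
  constructor
  · rintro ⟨k, ⟨_, ⟨⟨h1, h2⟩, h3⟩, h4⟩, rfl⟩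
    exact ⟨k, ⟨h1, h2, h3, h4⟩, rfl⟩
  · rintro ⟨k, ⟨h1, h2, h3, h4⟩, rfl⟩
    exact ⟨k, ⟨by omega, ⟨⟨h1, h2⟩, h3⟩, h4⟩, rfl⟩

-- loop invariant: entries above i are final and related, entries at or below i untouched
def pvInv (cs : List Char) (i : Int) (mc dp : List Int) : Prop :=
  mc.length = cs.length ∧ dp.length = cs.length + 1 ∧ dp.getD cs.length 0 = 0 ∧
  (∀ k : Nat, 0 ≤ dp.getD k 0) ∧
  (∀ k : Nat, k < cs.length →
    ((i < (k : Int) → mc.getD k 0 = dp.getD k 0 - 1) ∧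
     ((k : Int) ≤ i → mc.getD k 0 = -1 ∧ dp.getD k 0 = 0)))

theorem pvInv_step (cs : List Char) (i : Nat) (hi : i < cs.length) (mc dp : List Int) (v : Int)
    (h : pvInv cs (i : Int) mc dp) (hv : -1 ≤ v) :
    pvInv cs ((i : Int) - 1) (mc.set i v) (dp.set i (v + 1)) := by
  obtain ⟨hmcl, hdpl, hdpn, hdppos, hrel⟩ := h
  have hmci : i < mc.length := by omega
  have hdpi : i < dp.length := by omega
  refine ⟨by simp [hmcl], by simp [hdpl], ?_, ?_, ?_⟩
  · rw [pvGetD_set dp i cs.length (v + 1) hdpi, if_neg (by omega)]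
    exact hdpn
  · intro k
    rw [pvGetD_set dp i k (v + 1) hdpi]
    split
    · omega
    · exact hdppos k
  · intro k hk
    rw [pvGetD_set dp i k (v + 1) hdpi, pvGetD_set mc i k v hmci]
    by_cases hik : i = k
    · subst hik
      simp only [if_true]
      exact ⟨fun _ => by omega, fun hle => by omega⟩
    · simp only [if_neg hik]
      obtain ⟨h1, h2⟩ := hrel k hk
      exact ⟨fun hlt => h1 (by omega), fun hle => h2 (by omega)⟩

theorem pvStep (cs : List Char) (numbers : List String) (i : Nat) (hi : i < cs.length)
    (mc dp : List Int) (h : pvInv cs (i : Int) mc dp) :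
    pvStepA cs numbers mc (i : Int) =
      mc.set i ((pvMin? (pvKV cs numbers dp i)).getD (-1)) ∧
    pvStepB cs numbers dp (i : Int) =
      dp.set i ((pvMin? (pvKV cs numbers dp i)).getD (-1) + 1) ∧
    -1 ≤ (pvMin? (pvKV cs numbers dp i)).getD (-1) := by
  obtain ⟨hmcl, hdpl, hdpn, hdppos, hrel⟩ := h
  have hdpi0 : dp.getD i 0 = 0 := ((hrel i hi).2 le_rfl).2
  have hmci0 : mc.getD i 0 = -1 := ((hrel i hi).2 le_rfl).1
  have hKVpos : ∀ x ∈ pvKV cs numbers dp i, 0 ≤ x := by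
    intro x hx
    obtain ⟨k, _, rfl⟩ := (pvMem_KV cs numbers dp i x).mp hx
    exact hdppos k
  have hv : -1 ≤ (pvMin? (pvKV cs numbers dp i)).getD (-1) := by
    cases hmin : pvMin? (pvKV cs numbers dp i) with
    | none => simp
    | some v =>
      have := hKVpos v (pvMin?_spec_some _ _ hmin).1
      simp only [Option.getD_some]
      omega
  refine ⟨?_, ?_, hv⟩
  -- === A side ===
  · simp only [pvStepA]
    rw [PySem.List.slice_from cs (by positivity)]
    simp only [Int.toNat_natCast]
    by_cases hsuf : cs.drop i ∈ pvL numbers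
    · have hc : PySem.Set.contains (PySem.Set.ofList (numbers.map String.toList)) (cs.drop i) = true := by
        rw [PySem.Set.contains_iff, PySem.Set.mem_ofList]
        exact hsuf
      rw [if_pos hc]
      have h0mem : (0 : Int) ∈ pvKV cs numbers dp i := by
        rw [pvMem_KV]
        refine ⟨cs.length, ⟨hi, le_rfl, ?_, Or.inl rfl⟩, hdpn.symm⟩
        rw [List.take_of_length_le (by rw [List.length_drop])]
        exact hsuf
      have hmin0 : pvMin? (pvKV cs numbers dp i) = some 0 := by
        cases hmin : pvMin? (pvKV cs numbers dp i) with
        | none =>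
          rw [pvMin?_eq_none_iff] at hmin
          rw [hmin] at h0mem
          exact absurd h0mem List.not_mem_nil
        | some v =>
          obtain ⟨hvmem, hvle⟩ := pvMin?_spec_some _ _ hmin
          have h1 := hKVpos v hvmem
          have h2 := hvle 0 h0mem
          congr 1
          omega
      rw [hmin0]
      simp [PySem.List.pySetD_natCast]
    · have hc : PySem.Set.contains (PySem.Set.ofList (numbers.map String.toList)) (cs.drop i) = false := by
        rw [Bool.eq_false_iff]
        intro hc
        rw [PySem.Set.contains_iff, PySem.Set.mem_ofList] at hc
        exact hsuf hc
      simp only [hc, Bool.false_eq_true, if_false]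
      rw [pvFoldCondOptMin (PySem.List.pyRange ((i : Int) + 1) (PySem.List.len cs) 1)
        (fun j => PySem.Set.contains (PySem.Set.ofList (numbers.map String.toList))
            (PySem.List.slice cs (some (i : Int)) (some j)) &&
          decide (0 ≤ PySem.List.pyGetD mc j 0))
        (fun j => PySem.List.pyGetD mc j 0 + 1)]
      have hmemA : ∀ x : Int,
          x ∈ (((PySem.List.pyRange ((i : Int) + 1) (PySem.List.len cs) 1).filter
            (fun j => PySem.Set.contains (PySem.Set.ofList (numbers.map String.toList))
                (PySem.List.slice cs (some (i : Int)) (some j)) &&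
              decide (0 ≤ PySem.List.pyGetD mc j 0))).map
            (fun j => PySem.List.pyGetD mc j 0 + 1)) ↔
          x ∈ pvKV cs numbers dp i := by
        intro x
        rw [pvMem_KV]
        simp only [List.mem_map, List.mem_filter, PySem.List.len_eq, PySem.List.mem_pyRange_one,
          Bool.and_eq_true, decide_eq_true_eq, PySem.Set.contains_iff, PySem.Set.mem_ofList,
          pvOK, pvL, List.mem_map]
        constructor
        · rintro ⟨j, ⟨⟨hj1, hj2⟩, hjin, hjge⟩, rfl⟩
          have hj0 : 0 ≤ j := by omega
          have hjk : j = ((j.toNat : Nat) : Int) := (Int.toNat_of_nonneg hj0).symm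
          rw [hjk] at hjin hjge ⊢
          rw [PySem.List.slice_natCast] at hjin
          rw [PySem.List.pyGetD_natCast] at hjge ⊢
          have hlt : j.toNat < cs.length := by omega
          have hfin := (hrel j.toNat hlt).1 (by omega)
          exact ⟨j.toNat, ⟨by omega, by omega, hjin, Or.inr (by omega)⟩, by omega⟩
        · rintro ⟨k, ⟨hik, hkn, hpc, hdisj⟩, rfl⟩
          have hkne : k ≠ cs.length := by
            intro hkeq
            rw [hkeq, List.take_of_length_le (by rw [List.length_drop])] at hpc
            obtain ⟨a, ha, haeq⟩ := hpc
            exact hsuf (by simp only [pvL, List.mem_map]; exact ⟨a, ha, haeq⟩)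
          have hklt : k < cs.length := by omega
          have hdpk : 0 < dp.getD k 0 := by
            rcases hdisj with hh | hh
            · exact absurd hh hkne
            · exact hh
          have hfin := (hrel k hklt).1 (by omega)
          refine ⟨(k : Int), ⟨⟨by omega, by omega⟩, ?_, ?_⟩, ?_⟩
          · rw [PySem.List.slice_natCast]
            exact hpc
          · rw [PySem.List.pyGetD_natCast]
            omega
          · rw [PySem.List.pyGetD_natCast]
            omega
      rw [pvMin?_congr _ _ hmemA]
      cases hmin : pvMin? (pvKV cs numbers dp i) with
      | none =>
        simp only [Option.getD_none]
        exact (pvSet_self mc i (-1) hmci0 (by omega)).symm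
      | some v =>
        simp only [Option.getD_some]
        simp [PySem.List.pySetD_natCast]
  -- === B side ===
  · simp only [pvStepB]
    rw [pvFoldCondSent numbers
      (fun num => decide ((i : Int) + PySem.List.len num.toList ≤ PySem.List.len cs) &&
        PySem.Chars.startswith (cs.drop ((i : Int)).toNat) num.toList &&
        (decide ((i : Int) + PySem.List.len num.toList = PySem.List.len cs) ||
         decide (0 < PySem.List.pyGetD dp ((i : Int) + PySem.List.len num.toList) 0)))
      (fun num => PySem.List.pyGetD dp ((i : Int) + PySem.List.len num.toList) 0)]
    have hcast : ∀ num : String,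
        ((i : Int) + PySem.List.len num.toList) = ((i + num.toList.length : Nat) : Int) := by
      intro num
      rw [PySem.List.len_eq]
      push_cast
      ring
    have hpos : ∀ x ∈ ((numbers.filter
        (fun num => decide ((i : Int) + PySem.List.len num.toList ≤ PySem.List.len cs) &&
          PySem.Chars.startswith (cs.drop ((i : Int)).toNat) num.toList &&
          (decide ((i : Int) + PySem.List.len num.toList = PySem.List.len cs) ||
           decide (0 < PySem.List.pyGetD dp ((i : Int) + PySem.List.len num.toList) 0)))).map
        (fun num => PySem.List.pyGetD dp ((i : Int) + PySem.List.len num.toList) 0 + 1)), 0 < x := by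
      intro x hx
      obtain ⟨num, _, rfl⟩ := List.mem_map.mp hx
      rw [hcast num, PySem.List.pyGetD_natCast]
      have := hdppos (i + num.toList.length)
      omega
    rw [pvSentFold _ hpos]
    have hmemB : ∀ x : Int,
        x ∈ ((numbers.filter
          (fun num => decide ((i : Int) + PySem.List.len num.toList ≤ PySem.List.len cs) &&
            PySem.Chars.startswith (cs.drop ((i : Int)).toNat) num.toList &&
            (decide ((i : Int) + PySem.List.len num.toList = PySem.List.len cs) ||
             decide (0 < PySem.List.pyGetD dp ((i : Int) + PySem.List.len num.toList) 0)))).map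
          (fun num => PySem.List.pyGetD dp ((i : Int) + PySem.List.len num.toList) 0 + 1)) ↔
        x ∈ (pvKV cs numbers dp i).map (· + 1) := by
      intro x
      simp only [List.mem_map, List.mem_filter, Bool.and_eq_true, Bool.or_eq_true,
        decide_eq_true_eq, Int.toNat_natCast, PySem.List.len_eq, ← Nat.cast_add,
        PySem.List.pyGetD_natCast, PySem.Chars.startswith_iff, Nat.cast_le, Nat.cast_inj,
        pvMem_KV, pvOK, pvL]
      constructor
      · rintro ⟨num, ⟨hnum, ⟨⟨hq1, hq2⟩, hq3⟩⟩, rfl⟩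
        have hlen0 : num.toList.length ≠ 0 := by
          intro h0
          rcases hq3 with hh | hh
          · omega
          · rw [h0, Nat.add_zero] at hh
            omega
        refine ⟨dp.getD (i + num.toList.length) 0, ⟨i + num.toList.length,
          ⟨by omega, hq1, ?_, hq3⟩, rfl⟩, rfl⟩
        have hieq : i + num.toList.length - i = num.toList.length := by omega
        rw [hieq]
        exact ⟨num, hnum, List.prefix_iff_eq_take.mp hq2⟩
      · rintro ⟨y, ⟨k, ⟨hik, hkn, hpc, hdisj⟩, rfl⟩, rfl⟩
        obtain ⟨num, hnum, hnumeq⟩ := hpc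
        have hlen : num.toList.length = k - i := by
          have := congrArg List.length hnumeq
          rw [List.length_take, List.length_drop] at this
          omega
        have hky : i + num.toList.length = k := by omega
        refine ⟨num, ⟨hnum, ⟨⟨by omega, ?_⟩, ?_⟩⟩, by rw [hky]⟩
        · rw [List.prefix_iff_eq_take, hlen]
          exact hnumeq
        · rw [hky]
          exact hdisj
    rw [pvMin?_congr _ _ hmemB, pvMin?_map_add]
    cases hmin : pvMin? (pvKV cs numbers dp i) with
    | none =>
      simp only [Option.map_none, Option.getD_none]
      simp [PySem.List.pySetD_natCast]
    | some v =>
      simp only [Option.map_some, Option.getD_some]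
      simp [PySem.List.pySetD_natCast]

theorem pvLoop (cs : List Char) (numbers : List String) : ∀ (m : Nat) (mc dp : List Int),
    m ≤ cs.length → pvInv cs ((m : Int) - 1) mc dp →
    pvInv cs (-1) ((PySem.List.pyRange ((m : Int) - 1) (-1) (-1)).foldl (pvStepA cs numbers) mc)
               ((PySem.List.pyRange ((m : Int) - 1) (-1) (-1)).foldl (pvStepB cs numbers) dp) := by
  intro m
  induction m with
  | zero =>
    intro mc dp _ h
    rw [PySem.List.pyRange_neg_one_eq_nil (by omega)]
    simpa using h
  | succ m ih =>
    intro mc dp hm h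
    have hmlt : m < cs.length := by omega
    have hcast : ((m + 1 : Nat) : Int) - 1 = (m : Int) := by push_cast; ring
    rw [hcast] at h ⊢
    rw [PySem.List.pyRange_neg_one_cons (by omega), List.foldl_cons, List.foldl_cons]
    obtain ⟨hA, hB, hv⟩ := pvStep cs numbers m hmlt mc dp h
    rw [hA, hB]
    exact ih _ _ (by omega) (pvInv_step cs m hmlt mc dp _ h hv)

-- ===== VERDICT (by name: the statement is the Claim_ definition above) =====
theorem numbersInPi_spec : Claim_equal_numbersInPi := by
  unfold Claim_equal_numbersInPi
  intro pi numbers _ hpre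
  unfold Spec_numbersInPi
  rw [pv_numbersInPi_eq, pv_numbersInPi_alt_eq]
  have hne : pi.toList ≠ [] := by
    intro hnil
    exact hpre (String.toList_inj.mp (hnil.trans rfl))
  have hn : 0 < pi.toList.length := List.length_pos_of_ne_nil hne
  have hinv0 : pvInv pi.toList ((pi.toList.length : Int) - 1)
      (List.replicate pi.toList.length (-1)) (List.replicate (pi.toList.length + 1) 0) := by
    refine ⟨by simp, by simp, ?_, ?_, ?_⟩
    · rw [pvReplicate_getD]
      simp
    · intro k
      rw [pvReplicate_getD]
      split <;> omega
    · intro k hk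
      constructor
      · intro hlt
        exfalso
        omega
      · intro _
        rw [pvReplicate_getD, pvReplicate_getD]
        rw [if_pos hk, if_pos (by omega)]
        exact ⟨rfl, rfl⟩
  have hfin := pvLoop pi.toList numbers pi.toList.length _ _ le_rfl hinv0
  obtain ⟨hmcl, hdpl, _, _, hrel⟩ := hfin
  rw [PySem.List.len_eq]
  rw [PySem.List.pyGetD_zero, PySem.List.pyGetD_zero]
  have h0 := (hrel 0 hn).1 (by norm_num)
  rw [pvGetD_eq _ 0 0 (by omega), pvGetD_eq _ 0 0 (by omega)] at h0
  rw [pvGetD_eq _ 0 (-1) (by omega), pvGetD_eq _ 0 0 (by omega)]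
  omega
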